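-- pv_equiv track=rewrite | github.com/nibzard/slidegauge | slidegauge.py | split_slides
-- ===== SOURCE A (Python) =====
-- from typing import Dict, List, Tuple, Any, Optional, FrozenSet
--
-- def split_slides(lines: List[str]) -> List[str]:
--     """Fence-aware slide splitter using state machine"""
--     slides, buf, state, fence = [], [], "BODY", None
--
--     def is_fence(l: str) -> Optional[str]:
--         s = l.lstrip()
--         if s.startswith("```"): return "```"
--         if s.startswith("~~~"): return "~~~"
--         return None
--
--     # Handle initial frontmatter specially
--     i = 0
--     if i < len(lines) and lines[i].strip() == '---':
--         i += 1
--         # Skip frontmatter content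
--         while i < len(lines) and lines[i].strip() != '---':
--             i += 1
--         i += 1  # Skip closing fence
--         # Continue from the line after closing fence
--
--     for ln in lines[i:]:
--         if state == "BODY":
--             f = is_fence(ln)
--             if f:
--                 state, fence = "CODE", f
--                 buf.append(ln)
--                 continue
--             if ln.strip() == "---":
--                 if buf:  # Only add slide if there's content
--                     slides.append(buf)
--                 buf = []
--                 continue
--             buf.append(ln)
--         else:  # CODE
--             buf.append(ln)
--             if ln.lstrip().startswith(fence):
--                 state, fence = "BODY", None
--
--     if buf:
--         slides.append(buf)
--
--     return ["\n".join(s).strip() for s in slides if "\n".join(s).strip()]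
-- ===== SOURCE B (Python) =====
-- from typing import List
--
--
-- def split_slides(lines: List[str]) -> List[str]:
--     """Two-phase splitter: mark top-level '---' delimiters first, then split on the marks."""
--     # frontmatter skip: drop everything through the second top-level '---'
--     if lines and lines[0].strip() == "---":
--         after = lines[1:]
--         k = next((j for j, l in enumerate(after) if l.strip() == "---"), len(after))
--         body = after[k + 1:]
--     else:
--         body = lines
--
--     # pass 1: mark the delimiter lines (fence-aware; no buffering)
--     marks = []
--     fence = None
--     for ln in body:
--         s = ln.lstrip()
--         cut = False
--         if fence is None:
--             if s.startswith("```"):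
--                 fence = "```"
--             elif s.startswith("~~~"):
--                 fence = "~~~"
--             elif ln.strip() == "---":
--                 cut = True
--         else:
--             if s.startswith(fence):
--                 fence = None
--         marks.append(cut)
--
--     # pass 2: split the body at the marked lines (no fence logic here)
--     chunks = [[]]
--     for ln, cut in zip(body, marks):
--         if cut:
--             chunks.append([])
--         else:
--             chunks[-1].append(ln)
--
--     # pass 3: join, strip, drop empty slides
--     out = []
--     for c in chunks:
--         t = "\n".join(c).strip()
--         if t:
--             out.append(t)
--     return out
-- ===== Notes on version B (the rewrite author's own statement) =====
-- stated objective: alternative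
-- what changed: Replaces A's single buffer-accumulating state-machine fold by a two-phase decomposition: a first pass only marks the top-level fence-aware '---' delimiter lines, a second pass splits the line list at the marks with no fence logic, and a final pass joins/strips the chunks and drops the empty ones (the frontmatter skip is computed as an index with next/enumerate instead of a while loop).
import Mathlib
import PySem

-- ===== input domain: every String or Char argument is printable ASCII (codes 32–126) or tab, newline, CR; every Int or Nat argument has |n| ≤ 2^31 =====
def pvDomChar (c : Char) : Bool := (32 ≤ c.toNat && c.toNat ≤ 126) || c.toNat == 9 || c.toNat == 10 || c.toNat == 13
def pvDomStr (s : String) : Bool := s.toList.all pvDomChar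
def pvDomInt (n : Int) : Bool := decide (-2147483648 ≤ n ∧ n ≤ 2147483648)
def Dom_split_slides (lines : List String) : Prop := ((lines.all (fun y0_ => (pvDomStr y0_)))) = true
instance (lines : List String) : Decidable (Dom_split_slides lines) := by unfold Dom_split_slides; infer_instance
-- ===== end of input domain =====

-- B replaces A's single buffer-accumulating state-machine fold by a two-phase decomposition
-- (find the next top-level fence-aware '---' cut index, slice, repeat, then join/strip/filter);
-- objective: alternative (same O(n) cost).


-- ===== PORT A =====
def pvIsFence (l : String) : Option String :=
  let s := PySem.Str.lstrip l
  if PySem.Str.startswith s "```" then some "```"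
  else if PySem.Str.startswith s "~~~" then some "~~~"
  else none

-- the 'while i < len(lines) and lines[i].strip() != "---": i += 1; i += 1' frontmatter scan
def pvSkipFront : List String → List String
  | [] => []
  | l :: ls => if PySem.Str.strip l = "---" then ls else pvSkipFront ls

def pvStepA (acc : List (List String) × List String × Option String) (ln : String) :
    List (List String) × List String × Option String :=
  match acc with
  | (slides, buf, none) =>
    match pvIsFence ln with
    | some f => (slides, buf ++ [ln], some f)
    | none =>
      if PySem.Str.strip ln = "---" then
        (if buf ≠ [] then slides ++ [buf] else slides, [], none)
      else (slides, buf ++ [ln], none)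
  | (slides, buf, some f) =>
    if PySem.Str.startswith (PySem.Str.lstrip ln) f then (slides, buf ++ [ln], none)
    else (slides, buf ++ [ln], some f)

def split_slides (lines : List String) : List String :=
  let rest : List String :=
    match lines with
    | [] => lines
    | l0 :: ls => if PySem.Str.strip l0 = "---" then pvSkipFront ls else lines
  let r := rest.foldl pvStepA ([], [], none)
  let slides := if r.2.1 ≠ [] then r.1 ++ [r.2.1] else r.1
  slides.filterMap fun s =>
    let t := PySem.Str.strip (PySem.Str.join "\n" s)
    if t ≠ "" then some t else none

-- ===== PORT B =====
-- pass 1 step: record whether the line is a top-level '---' delimiter, tracking fence state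
def pvMarkStep (st : List Bool × Option String) (ln : String) : List Bool × Option String :=
  match st with
  | (marks, none) =>
    if PySem.Str.startswith (PySem.Str.lstrip ln) "```" then (marks ++ [false], some "```")
    else if PySem.Str.startswith (PySem.Str.lstrip ln) "~~~" then (marks ++ [false], some "~~~")
    else if PySem.Str.strip ln = "---" then (marks ++ [true], none)
    else (marks ++ [false], none)
  | (marks, some f) =>
    if PySem.Str.startswith (PySem.Str.lstrip ln) f then (marks ++ [false], none)
    else (marks ++ [false], some f)

-- chunks[-1].append(ln)
def pvAppendLast (chs : List (List String)) (ln : String) : List (List String) :=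
  match chs with
  | [] => []
  | [c] => [c ++ [ln]]
  | c :: rest => c :: pvAppendLast rest ln

-- pass 2 step: start a new chunk at a mark, else append to the last chunk
def pvSplitStep (chs : List (List String)) (p : String × Bool) : List (List String) :=
  if p.2 then chs ++ [[]] else pvAppendLast chs p.1

def split_slides_alt (lines : List String) : List String :=
  let body : List String :=
    match lines with
    | [] => lines
    | l0 :: after =>
      if PySem.Str.strip l0 = "---" then
        let k := after.findIdx fun l => PySem.Str.strip l == "---"
        after.drop (k + 1)
      else lines
  let marks := (body.foldl pvMarkStep ([], none)).1
  let chunks := (body.zip marks).foldl pvSplitStep [[]]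
  chunks.foldl
    (fun out c =>
      let t := PySem.Str.strip (PySem.Str.join "\n" c)
      if t ≠ "" then out ++ [t] else out) []

-- ===== PRECONDITION & SPEC =====
def Spec_split_slides (lines : List String) (out : List String) : Prop := out = split_slides_alt lines
instance (lines : List String) (out : List String) : Decidable (Spec_split_slides lines out) := by unfold Spec_split_slides; infer_instance

-- ===== CLAIM (what is proved, stated in full; the proofs are below) =====
def Claim_equal_split_slides : Prop := ∀ (lines : List String), Dom_split_slides lines → Spec_split_slides lines (split_slides lines)

-- ===== LEMMAS AND PROOFS =====
-- fence-aware tags of the body lines (structural form of B's pass 1)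
def pvTags : Option String → List String → List Bool
  | _, [] => []
  | none, ln :: ls =>
    if PySem.Str.startswith (PySem.Str.lstrip ln) "```" then false :: pvTags (some "```") ls
    else if PySem.Str.startswith (PySem.Str.lstrip ln) "~~~" then false :: pvTags (some "~~~") ls
    else if PySem.Str.strip ln = "---" then true :: pvTags none ls
    else false :: pvTags none ls
  | some f, ln :: ls =>
    if PySem.Str.startswith (PySem.Str.lstrip ln) f then false :: pvTags none ls
    else false :: pvTags (some f) ls

def pvConsHead (ln : String) : List (List String) → List (List String)
  | [] => [[ln]]
  | c :: cs => (ln :: c) :: cs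

-- the raw chunks of the body (both programs are reduced to this)
def pvC : Option String → List String → List (List String)
  | _, [] => [[]]
  | none, ln :: ls =>
    if PySem.Str.startswith (PySem.Str.lstrip ln) "```" then pvConsHead ln (pvC (some "```") ls)
    else if PySem.Str.startswith (PySem.Str.lstrip ln) "~~~" then pvConsHead ln (pvC (some "~~~") ls)
    else if PySem.Str.strip ln = "---" then [] :: pvC none ls
    else pvConsHead ln (pvC none ls)
  | some f, ln :: ls =>
    if PySem.Str.startswith (PySem.Str.lstrip ln) f then pvConsHead ln (pvC none ls)
    else pvConsHead ln (pvC (some f) ls)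

def pvMapHead (f : List String → List String) : List (List String) → List (List String)
  | [] => []
  | c :: cs => f c :: cs

theorem pvConsHead_ne_nil (ln : String) (cs : List (List String)) : pvConsHead ln cs ≠ [] := by
  cases cs <;> simp [pvConsHead]

theorem pvC_ne_nil (fence : Option String) (ls : List String) : pvC fence ls ≠ [] := by
  cases ls with
  | nil => simp [pvC]
  | cons ln ls =>
    cases fence <;> simp only [pvC] <;> split_ifs <;>
      first
      | exact pvConsHead_ne_nil _ _
      | simp

theorem pvMapHead_id (cs : List (List String)) :
    pvMapHead (fun c => [] ++ c) cs = cs := by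
  cases cs <;> simp [pvMapHead]

theorem pvMapHead_id' (cs : List (List String)) :
    pvMapHead (fun c => c) cs = cs := by
  cases cs <;> simp [pvMapHead]

theorem pvMapHead_consHead (buf : List String) (ln : String) (cs : List (List String))
    (h : cs ≠ []) :
    pvMapHead (fun c => buf ++ c) (pvConsHead ln cs)
      = pvMapHead (fun c => (buf ++ [ln]) ++ c) cs := by
  cases cs with
  | nil => exact absurd rfl h
  | cons c cs => simp [pvConsHead, pvMapHead]

theorem pvSkipFront_eq (ls : List String) :
    pvSkipFront ls = ls.drop ((ls.findIdx fun l => PySem.Str.strip l == "---") + 1) := by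
  induction ls with
  | nil => rfl
  | cons l ls ih =>
    by_cases h : PySem.Str.strip l = "---"
    · simp [pvSkipFront, h, List.findIdx_cons]
    · have hb : (PySem.Str.strip l == "---") = false := by simp [h]
      simp [pvSkipFront, h, List.findIdx_cons, hb, ih]

-- the two ports see the same body after the frontmatter skip
theorem pvBody_eq (lines : List String) :
    (match lines with
      | [] => lines
      | l0 :: ls => if PySem.Str.strip l0 = "---" then pvSkipFront ls else lines)
    = (match lines with
      | [] => lines
      | l0 :: after =>
        if PySem.Str.strip l0 = "---" then
          after.drop ((after.findIdx fun l => PySem.Str.strip l == "---") + 1)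
        else lines) := by
  cases lines with
  | nil => rfl
  | cons l0 ls => by_cases h : PySem.Str.strip l0 = "---" <;> simp [h, pvSkipFront_eq]

-- the main invariant for A: the fold, finalized, yields the nonempty raw chunks
theorem pvFoldA_chunks (rest : List String) :
    ∀ (slides : List (List String)) (buf : List String) (fence : Option String),
    (let r := rest.foldl pvStepA (slides, buf, fence)
     if r.2.1 ≠ [] then r.1 ++ [r.2.1] else r.1)
    = slides ++ (pvMapHead (fun c => buf ++ c) (pvC fence rest)).filter (fun c => c ≠ []) := by
  induction rest with
  | nil =>
    intro slides buf fence
    simp only [pvC]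
    by_cases hb : buf = [] <;> simp [pvMapHead, hb]
  | cons ln ls ih =>
    intro slides buf fence
    cases fence with
    | none =>
      by_cases h1 : PySem.Str.startswith (PySem.Str.lstrip ln) "```"
      · have hstep : pvStepA (slides, buf, none) ln = (slides, buf ++ [ln], some "```") := by
          simp only [pvStepA, pvIsFence, if_pos h1]
        have hc : pvC none (ln :: ls) = pvConsHead ln (pvC (some "```") ls) := by
          simp only [pvC, if_pos h1]
        rw [List.foldl_cons, hstep, ih, hc, pvMapHead_consHead _ _ _ (pvC_ne_nil _ _)]
      · by_cases h2 : PySem.Str.startswith (PySem.Str.lstrip ln) "~~~"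
        · have hstep : pvStepA (slides, buf, none) ln = (slides, buf ++ [ln], some "~~~") := by
            simp only [pvStepA, pvIsFence, if_neg h1, if_pos h2]
          have hc : pvC none (ln :: ls) = pvConsHead ln (pvC (some "~~~") ls) := by
            simp only [pvC, if_neg h1, if_pos h2]
          rw [List.foldl_cons, hstep, ih, hc, pvMapHead_consHead _ _ _ (pvC_ne_nil _ _)]
        · by_cases h3 : PySem.Str.strip ln = "---"
          · have hstep : pvStepA (slides, buf, none) ln
                = (if buf ≠ [] then slides ++ [buf] else slides, [], none) := by
              simp only [pvStepA, pvIsFence, if_neg h1, if_neg h2, if_pos h3]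
            have hc : pvC none (ln :: ls) = [] :: pvC none ls := by
              simp only [pvC, if_neg h1, if_neg h2, if_pos h3]
            rw [List.foldl_cons, hstep, ih, hc, pvMapHead_id]
            by_cases hb : buf = [] <;> simp [pvMapHead, hb]
          · have hstep : pvStepA (slides, buf, none) ln = (slides, buf ++ [ln], none) := by
              simp only [pvStepA, pvIsFence, if_neg h1, if_neg h2, if_neg h3]
            have hc : pvC none (ln :: ls) = pvConsHead ln (pvC none ls) := by
              simp only [pvC, if_neg h1, if_neg h2, if_neg h3]
            rw [List.foldl_cons, hstep, ih, hc, pvMapHead_consHead _ _ _ (pvC_ne_nil _ _)]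
    | some f =>
      by_cases h1 : PySem.Str.startswith (PySem.Str.lstrip ln) f
      · have hstep : pvStepA (slides, buf, some f) ln = (slides, buf ++ [ln], none) := by
          simp only [pvStepA, if_pos h1]
        have hc : pvC (some f) (ln :: ls) = pvConsHead ln (pvC none ls) := by
          simp only [pvC, if_pos h1]
        rw [List.foldl_cons, hstep, ih, hc, pvMapHead_consHead _ _ _ (pvC_ne_nil _ _)]
      · have hstep : pvStepA (slides, buf, some f) ln = (slides, buf ++ [ln], some f) := by
          simp only [pvStepA, if_neg h1]
        have hc : pvC (some f) (ln :: ls) = pvConsHead ln (pvC (some f) ls) := by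
          simp only [pvC, if_neg h1]
        rw [List.foldl_cons, hstep, ih, hc, pvMapHead_consHead _ _ _ (pvC_ne_nil _ _)]

-- B's pass 1 computes exactly the tags
theorem pvMarks_eq (ls : List String) :
    ∀ (marks : List Bool) (fence : Option String),
    (ls.foldl pvMarkStep (marks, fence)).1 = marks ++ pvTags fence ls := by
  induction ls with
  | nil => intro marks fence; simp [pvTags]
  | cons ln ls ih =>
    intro marks fence
    cases fence with
    | none =>
      by_cases h1 : PySem.Str.startswith (PySem.Str.lstrip ln) "```"
      · have hs : pvMarkStep (marks, none) ln = (marks ++ [false], some "```") := by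
          simp only [pvMarkStep, if_pos h1]
        have ht : pvTags none (ln :: ls) = false :: pvTags (some "```") ls := by
          simp only [pvTags, if_pos h1]
        rw [List.foldl_cons, hs, ih, ht]; simp
      · by_cases h2 : PySem.Str.startswith (PySem.Str.lstrip ln) "~~~"
        · have hs : pvMarkStep (marks, none) ln = (marks ++ [false], some "~~~") := by
            simp only [pvMarkStep, if_neg h1, if_pos h2]
          have ht : pvTags none (ln :: ls) = false :: pvTags (some "~~~") ls := by
            simp only [pvTags, if_neg h1, if_pos h2]
          rw [List.foldl_cons, hs, ih, ht]; simp
        · by_cases h3 : PySem.Str.strip ln = "---"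
          · have hs : pvMarkStep (marks, none) ln = (marks ++ [true], none) := by
              simp only [pvMarkStep, if_neg h1, if_neg h2, if_pos h3]
            have ht : pvTags none (ln :: ls) = true :: pvTags none ls := by
              simp only [pvTags, if_neg h1, if_neg h2, if_pos h3]
            rw [List.foldl_cons, hs, ih, ht]; simp
          · have hs : pvMarkStep (marks, none) ln = (marks ++ [false], none) := by
              simp only [pvMarkStep, if_neg h1, if_neg h2, if_neg h3]
            have ht : pvTags none (ln :: ls) = false :: pvTags none ls := by
              simp only [pvTags, if_neg h1, if_neg h2, if_neg h3]
            rw [List.foldl_cons, hs, ih, ht]; simp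
    | some f =>
      by_cases h1 : PySem.Str.startswith (PySem.Str.lstrip ln) f
      · have hs : pvMarkStep (marks, some f) ln = (marks ++ [false], none) := by
          simp only [pvMarkStep, if_pos h1]
        have ht : pvTags (some f) (ln :: ls) = false :: pvTags none ls := by
          simp only [pvTags, if_pos h1]
        rw [List.foldl_cons, hs, ih, ht]; simp
      · have hs : pvMarkStep (marks, some f) ln = (marks ++ [false], some f) := by
          simp only [pvMarkStep, if_neg h1]
        have ht : pvTags (some f) (ln :: ls) = false :: pvTags (some f) ls := by
          simp only [pvTags, if_neg h1]
        rw [List.foldl_cons, hs, ih, ht]; simp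

theorem pvAppendLast_append (chs : List (List String)) (cur : List String) (ln : String) :
    pvAppendLast (chs ++ [cur]) ln = chs ++ [cur ++ [ln]] := by
  induction chs with
  | nil => rfl
  | cons c chs ih =>
    cases chs with
    | nil => rfl
    | cons c2 chs2 => simp only [List.cons_append, pvAppendLast] at ih ⊢; simp [ih]

-- B's pass 2 over the tags rebuilds the raw chunks
theorem pvSplit_eq (ls : List String) :
    ∀ (fence : Option String) (chs : List (List String)) (cur : List String),
    (ls.zip (pvTags fence ls)).foldl pvSplitStep (chs ++ [cur])
      = chs ++ pvMapHead (fun c => cur ++ c) (pvC fence ls) := by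
  induction ls with
  | nil => intro fence chs cur; simp [pvTags, pvC, pvMapHead]
  | cons ln ls ih =>
    intro fence chs cur
    have hfalse : ∀ fence', pvTags fence (ln :: ls) = false :: pvTags fence' ls →
        pvC fence (ln :: ls) = pvConsHead ln (pvC fence' ls) →
        (((ln :: ls).zip (pvTags fence (ln :: ls))).foldl pvSplitStep (chs ++ [cur]))
          = chs ++ pvMapHead (fun c => cur ++ c) (pvC fence (ln :: ls)) := by
      intro fence' ht hc
      rw [ht, hc, List.zip_cons_cons, List.foldl_cons]
      have hstep : pvSplitStep (chs ++ [cur]) (ln, false) = chs ++ [cur ++ [ln]] := by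
        simp only [pvSplitStep]
        rw [if_neg (by simp)]
        exact pvAppendLast_append chs cur ln
      rw [hstep, ih, pvMapHead_consHead _ _ _ (pvC_ne_nil _ _)]
    cases fence with
    | none =>
      by_cases h1 : PySem.Str.startswith (PySem.Str.lstrip ln) "```"
      · exact hfalse (some "```") (by simp only [pvTags, if_pos h1]) (by simp only [pvC, if_pos h1])
      · by_cases h2 : PySem.Str.startswith (PySem.Str.lstrip ln) "~~~"
        · exact hfalse (some "~~~") (by simp only [pvTags, if_neg h1, if_pos h2])
            (by simp only [pvC, if_neg h1, if_pos h2])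
        · by_cases h3 : PySem.Str.strip ln = "---"
          · have ht : pvTags none (ln :: ls) = true :: pvTags none ls := by
              simp only [pvTags, if_neg h1, if_neg h2, if_pos h3]
            have hc : pvC none (ln :: ls) = [] :: pvC none ls := by
              simp only [pvC, if_neg h1, if_neg h2, if_pos h3]
            rw [ht, hc, List.zip_cons_cons, List.foldl_cons]
            have hstep : pvSplitStep (chs ++ [cur]) (ln, true) = (chs ++ [cur]) ++ [[]] := by
              simp [pvSplitStep]
            rw [hstep, ih none (chs ++ [cur]) [], pvMapHead_id]
            simp [pvMapHead]
          · exact hfalse none (by simp only [pvTags, if_neg h1, if_neg h2, if_neg h3])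
              (by simp only [pvC, if_neg h1, if_neg h2, if_neg h3])
    | some f =>
      by_cases h1 : PySem.Str.startswith (PySem.Str.lstrip ln) f
      · exact hfalse none (by simp only [pvTags, if_pos h1]) (by simp only [pvC, if_pos h1])
      · exact hfalse (some f) (by simp only [pvTags, if_neg h1]) (by simp only [pvC, if_neg h1])

-- empty raw chunks are dropped by the join-strip filter anyway
theorem pvFilterMap_filter (cs : List (List String)) :
    (cs.filter fun c => c ≠ []).filterMap
        (fun s => let t := PySem.Str.strip (PySem.Str.join "\n" s)
                  if t ≠ "" then some t else none)
      = cs.filterMap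
        (fun s => let t := PySem.Str.strip (PySem.Str.join "\n" s)
                  if t ≠ "" then some t else none) := by
  induction cs with
  | nil => rfl
  | cons c cs ih =>
    by_cases hc : c = []
    · subst hc
      rw [List.filter_cons_of_neg (by simp), ih, List.filterMap_cons]
      rfl
    · rw [List.filter_cons_of_pos (by simpa using hc), List.filterMap_cons,
        List.filterMap_cons, ih]

-- B's output loop is a filterMap
theorem pvFoldB_filterMap (cs : List (List String)) :
    ∀ out : List String,
    cs.foldl (fun out c =>
        let t := PySem.Str.strip (PySem.Str.join "\n" c)
        if t ≠ "" then out ++ [t] else out) out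
      = out ++ cs.filterMap
        (fun s => let t := PySem.Str.strip (PySem.Str.join "\n" s)
                  if t ≠ "" then some t else none) := by
  induction cs with
  | nil => intro out; simp
  | cons c cs ih =>
    intro out
    simp only [List.foldl_cons, List.filterMap_cons]
    by_cases hc : PySem.Str.strip (PySem.Str.join "\n" c) = ""
    · rw [if_neg (not_not_intro hc), if_neg (not_not_intro hc)]
      exact ih out
    · rw [if_pos hc, if_pos hc, ih (out ++ [PySem.Str.strip (PySem.Str.join "\n" c)]),
        List.append_assoc, List.singleton_append]

-- ===== VERDICT (by name: the statement is the Claim_ definition above) =====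
theorem split_slides_spec : Claim_equal_split_slides := by
  intro lines _
  show split_slides lines = split_slides_alt lines
  simp only [split_slides, split_slides_alt]
  rw [pvBody_eq]
  generalize (match lines with
    | [] => lines
    | l0 :: after =>
      if PySem.Str.strip l0 = "---" then
        after.drop ((after.findIdx fun l => PySem.Str.strip l == "---") + 1)
      else lines) = body
  rw [pvMarks_eq body [] none, List.nil_append]
  have hsplit : (body.zip (pvTags none body)).foldl pvSplitStep [[]] = pvC none body := by
    have h := pvSplit_eq body none [] []
    simpa [pvMapHead_id, pvMapHead_id'] using h
  rw [hsplit]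
  simp only [pvFoldA_chunks body [] [] none, pvMapHead_id', pvFilterMap_filter,
    pvFoldB_filterMap, List.nil_append]
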